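-- pv_equiv track=rewrite | github.com/hyperlykan99/HighRise_Bot | artifacts/highrise-bot/modules/mining.py | _safe_per_page
-- ===== SOURCE A (Python) =====
-- def _safe_per_page(header: str, item_lines: list[str], limit: int = 220) -> int:
--     """Return how many items from item_lines fit after header within limit chars."""
--     count = 0
--     msg   = header
--     for line in item_lines[:8]:
--         candidate = msg + "\n" + line
--         if len(candidate) > limit:
--             break
--         msg = candidate
--         count += 1
--     return max(1, count)
-- ===== SOURCE B (Python) =====
-- def _safe_per_page(header: str, item_lines: list[str], limit: int = 220) -> int:
--     """Return how many items from item_lines fit after header within limit chars."""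
--     costs = [len(line) + 1 for line in item_lines[:8]]
--     count = sum(1 for i in range(len(costs))
--                 if len(header) + sum(costs[:i + 1]) <= limit)
--     return max(1, count)
-- ===== Notes on version B (the rewrite author's own statement) =====
-- stated objective: alternative
-- what changed: Replaces the incremental string-building loop with early break by a per-item length table whose prefix sums are compared against the limit (the prefix sums are strictly increasing, so counting all fitting prefixes equals the early-break count); no string concatenation and no break.
import Mathlib
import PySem

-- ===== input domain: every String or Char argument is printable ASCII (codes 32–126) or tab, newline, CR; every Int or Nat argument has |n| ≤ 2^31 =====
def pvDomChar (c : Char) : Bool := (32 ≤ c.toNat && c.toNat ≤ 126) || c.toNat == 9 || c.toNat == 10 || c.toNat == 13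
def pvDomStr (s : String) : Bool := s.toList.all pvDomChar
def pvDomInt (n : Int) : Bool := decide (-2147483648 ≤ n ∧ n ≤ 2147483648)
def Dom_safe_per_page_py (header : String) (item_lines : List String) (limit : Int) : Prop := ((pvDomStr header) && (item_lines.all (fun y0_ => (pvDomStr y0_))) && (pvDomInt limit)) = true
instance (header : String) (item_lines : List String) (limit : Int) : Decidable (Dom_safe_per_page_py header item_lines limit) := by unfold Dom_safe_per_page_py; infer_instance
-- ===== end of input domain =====

-- B replaces A's incremental string building with an early break by a table of per-item
-- length costs whose prefix sums are counted against the limit (alternative decomposition,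
-- no speed claim: both scan at most 8 items).

-- ===== PORT A =====
-- the for-loop of A: state (count, msg); 'break' returns the current count
def pvGoA (limit : Int) : List String → Int → String → Int
  | [], count, _ => count
  | line :: rest, count, msg =>
      let candidate := msg ++ "\n" ++ line
      if limit < PySem.Str.len candidate then count
      else pvGoA limit rest (count + 1) candidate

def safe_per_page_py (header : String) (item_lines : List String) (limit : Int) : Int :=
  max 1 (pvGoA limit (PySem.List.slice item_lines (some 0) (some 8)) 0 header)

-- ===== PORT B =====
def safe_per_page_py_alt (header : String) (item_lines : List String) (limit : Int) : Int :=
  let costs : List Int :=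
    (PySem.List.slice item_lines (some 0) (some 8)).map (fun line => PySem.Str.len line + 1)
  let count : Nat :=
    (PySem.List.pyRange 0 (costs.length : Int) 1).countP
      (fun i => decide (PySem.Str.len header + (PySem.List.slice costs (some 0) (some (i + 1))).sum ≤ limit))
  max 1 (count : Int)

-- ===== PRECONDITION & SPEC =====
def Spec_safe_per_page_py (header : String) (item_lines : List String) (limit : Int) (out : Int) : Prop := out = safe_per_page_py_alt header item_lines limit
instance (header : String) (item_lines : List String) (limit : Int) (out : Int) : Decidable (Spec_safe_per_page_py header item_lines limit out) := by unfold Spec_safe_per_page_py; infer_instance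

-- ===== CLAIM (what is proved, stated in full; the proofs are below) =====
def Claim_equal_safe_per_page_py : Prop := ∀ (header : String) (item_lines : List String) (limit : Int), Dom_safe_per_page_py header item_lines limit → Spec_safe_per_page_py header item_lines limit (safe_per_page_py header item_lines limit)

-- ===== LEMMAS AND PROOFS =====

-- the number of prefixes of `costs` whose sum, added to `base`, stays within `limit`
def pvFit (limit base : Int) (costs : List Int) : Nat :=
  (List.range costs.length).countP (fun i => decide (base + ((costs.take (i + 1)).sum) ≤ limit))

theorem pvFit_nil (limit base : Int) : pvFit limit base [] = 0 := by
  simp [pvFit]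

theorem pvFit_cons (limit base c : Int) (cs : List Int) :
    pvFit limit base (c :: cs) =
      (if base + c ≤ limit then 1 else 0) + pvFit limit (base + c) cs := by
  unfold pvFit
  rw [List.length_cons, List.range_succ_eq_map, List.countP_cons, List.countP_map]
  have h1 : ∀ x ∈ List.range cs.length,
      ((fun i => decide (base + (((c :: cs).take (i + 1)).sum) ≤ limit)) ∘ Nat.succ) x = true
        ↔ (fun i => decide (base + c + ((cs.take (i + 1)).sum) ≤ limit)) x = true := by
    intro x _
    simp only [Function.comp_apply, Nat.succ_eq_add_one, List.take_succ_cons, List.sum_cons,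
      decide_eq_true_eq]
    omega
  rw [List.countP_congr h1]
  by_cases h : base + c ≤ limit
  · simp [h, Nat.add_comm]
  · simp [h]

theorem pvFit_zero (limit base : Int) (cs : List Int)
    (hb : limit < base) (hc : ∀ c ∈ cs, 0 ≤ c) : pvFit limit base cs = 0 := by
  induction cs generalizing base with
  | nil => exact pvFit_nil limit base
  | cons c cs ih =>
    have hc0 : 0 ≤ c := hc c (List.mem_cons_self)
    rw [pvFit_cons, if_neg (by omega), ih (base + c) (by omega)
      (fun d hd => hc d (List.mem_cons_of_mem _ hd))]

theorem pv_len_nonneg (s : String) : 0 ≤ PySem.Str.len s := by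
  simp [PySem.Str.len_eq]

theorem pv_len_candidate (msg line : String) :
    PySem.Str.len (msg ++ "\n" ++ line) = PySem.Str.len msg + (PySem.Str.len line + 1) := by
  simp [PySem.Str.len_eq]

theorem pvGoA_eq (limit : Int) (xs : List String) :
    ∀ (count : Int) (msg : String),
      pvGoA limit xs count msg =
        count + (pvFit limit (PySem.Str.len msg) (xs.map (fun l => PySem.Str.len l + 1)) : Int) := by
  induction xs with
  | nil => intro count msg; simp [pvGoA, pvFit_nil]
  | cons line rest ih =>
    intro count msg
    simp only [pvGoA, List.map_cons, pvFit_cons, pv_len_candidate]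
    by_cases h : PySem.Str.len msg + (PySem.Str.len line + 1) ≤ limit
    · rw [if_neg (by omega), ih (count + 1) (msg ++ "\n" ++ line), pv_len_candidate,
        if_pos h]
      push_cast; ring
    · rw [if_pos (by omega), if_neg h,
        pvFit_zero limit _ _ (by omega)
          (fun d hd => by
            obtain ⟨l, _, rfl⟩ := List.mem_map.mp hd
            have := pv_len_nonneg l; omega)]
      push_cast; ring

theorem pv_bcount_eq (limit base : Int) (costs : List Int) :
    (PySem.List.pyRange 0 (costs.length : Int) 1).countP
      (fun i => decide (base + (PySem.List.slice costs (some 0) (some (i + 1))).sum ≤ limit))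
      = pvFit limit base costs := by
  rw [PySem.List.pyRange_one, List.countP_map]
  unfold pvFit
  simp only [Int.sub_zero, Int.toNat_natCast]
  apply List.countP_congr
  intro x _
  simp only [Function.comp_apply, zero_add]
  rw [show ((x : Int) + 1) = ((x + 1 : Nat) : Int) by push_cast; ring]
  rw [PySem.List.slice_zero_start, PySem.List.slice_to_natCast]

-- ===== VERDICT (by name: the statement is the Claim_ definition above) =====
theorem safe_per_page_py_spec : Claim_equal_safe_per_page_py := by
  intro header item_lines limit _
  unfold Spec_safe_per_page_py safe_per_page_py safe_per_page_py_alt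
  simp only [pvGoA_eq, pv_bcount_eq]
  simp
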